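-- pv_equiv track=rewrite | github.com/denton1612/Faculty | Teme/An 1/Semestrul 1/FP/lab4-6/proiect_lab4-6/lab4-6.py | order_by_imaginary
-- ===== SOURCE A (Python) =====
-- def order_by_imaginary(sir_nr):
--     '''
--     Functia returneaza o copie a listei de numere complexe (are aceleasi elemente), dar ordonate descrescator dupa partea imaginara
--     :param sir_nr: list
--     :return: list
--     '''
--     sir_nr_1 = sir_nr.copy()
--     sortat = False
--     while sortat == False:
--         sortat = True
--         for i in range(len(sir_nr_1)-1):
--             if sir_nr_1[i][1] < sir_nr_1[i+1][1]:
--                 sortat = False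
--                 sir_nr_1[i], sir_nr_1[i+1] = sir_nr_1[i+1], sir_nr_1[i]
--     return sir_nr_1
-- ===== SOURCE B (Python) =====
-- def order_by_imaginary(sir_nr):
--     '''Returns a copy of the list ordered descending by imaginary part (stable).'''
--     return sorted(sir_nr, key=lambda x: x[1], reverse=True)
-- ===== Notes on version B (the rewrite author's own statement) =====
-- stated objective: faster
-- what changed: Replaces the hand-written repeated-pass bubble sort with a single call to Python's built-in stable sorted() keyed on the imaginary part with reverse=True.
import Mathlib
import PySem

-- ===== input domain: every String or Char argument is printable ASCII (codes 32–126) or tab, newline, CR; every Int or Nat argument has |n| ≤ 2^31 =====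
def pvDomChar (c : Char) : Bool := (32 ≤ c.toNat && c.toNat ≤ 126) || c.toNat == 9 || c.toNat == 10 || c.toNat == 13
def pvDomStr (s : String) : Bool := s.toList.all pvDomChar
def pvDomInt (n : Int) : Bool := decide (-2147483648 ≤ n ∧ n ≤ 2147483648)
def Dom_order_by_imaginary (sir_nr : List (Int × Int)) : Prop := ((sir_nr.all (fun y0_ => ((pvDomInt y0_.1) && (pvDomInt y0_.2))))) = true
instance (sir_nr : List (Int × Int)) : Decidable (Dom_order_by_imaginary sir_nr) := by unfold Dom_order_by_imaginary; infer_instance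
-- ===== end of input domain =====

-- B replaces A's repeated-pass bubble sort by one call to Python's stable sorted()
-- descending on the imaginary part (faster); return values proved equal, A mutates nothing observable.

-- ===== PORT A =====
-- one pass of the inner `for` loop over adjacent pairs; returns (list after the pass, sortat flag)
def pvPass : List (Int × Int) → List (Int × Int) × Bool
  | [] => ([], true)
  | [a] => ([a], true)
  | a :: b :: t =>
    if a.2 < b.2 then
      (b :: (pvPass (a :: t)).1, false)
    else
      ((a :: (pvPass (b :: t)).1), (pvPass (b :: t)).2)

-- number of inversions w.r.t. the descending-by-snd order; termination measure of the while loop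
def pvInv : List (Int × Int) → Nat
  | [] => 0
  | a :: t => t.countP (fun b => a.2 < b.2) + pvInv t

theorem pvPass_perm (xs : List (Int × Int)) : (pvPass xs).1.Perm xs := by
  fun_induction pvPass with
  | case1 => simp
  | case2 a => simp
  | case3 a b t h ih =>
      
      exact ((ih.cons b).trans (List.Perm.swap a b t))
  | case4 a b t h ih =>
      exact ih.cons a

theorem pvPass_inv (xs : List (Int × Int)) :
    pvInv (pvPass xs).1 ≤ pvInv xs ∧ ((pvPass xs).2 = false → pvInv (pvPass xs).1 < pvInv xs) := by
  fun_induction pvPass with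
  | case1 => simp
  | case2 a => simp
  | case3 a b t h ih =>
      
      have hc := (pvPass_perm (a :: t)).countP_eq (fun c => decide (b.2 < c.2))
      have hc' : (List.countP (fun c => decide (b.2 < c.2)) (a :: t))
          = List.countP (fun c => decide (b.2 < c.2)) t := by
        simp only [List.countP_cons]
        have : ¬ b.2 < a.2 := by omega
        simp [this]
      simp only [pvInv, List.countP_cons]
      have h1 : decide (a.2 < b.2) = true := by simpa using h
      constructor
      · rw [hc, hc']
        have := ih.1
        simp only [pvInv] at this
        omega
      · intro _
        rw [hc, hc']
        have := ih.1
        simp only [pvInv] at this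
        simp [h1]
        omega
  | case4 a b t h ih =>
      have hc := (pvPass_perm (b :: t)).countP_eq (fun c => decide (a.2 < c.2))
      simp only [pvInv] at *
      rw [hc]
      simp only [List.countP_cons]
      constructor
      · omega
      · intro hf
        have := ih.2 hf
        omega

-- the `while sortat == False` loop; terminates because a pass with a swap removes an inversion
def pvBubble (l : List (Int × Int)) : List (Int × Int) :=
  if h : (pvPass l).2 then (pvPass l).1 else pvBubble (pvPass l).1
  termination_by pvInv l
  decreasing_by exact (pvPass_inv l).2 (by simpa using h)

def order_by_imaginary (sir_nr : List (Int × Int)) : List (Int × Int) :=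
  pvBubble sir_nr

-- ===== PORT B =====
def order_by_imaginary_alt (sir_nr : List (Int × Int)) : List (Int × Int) :=
  PySem.List.sorted sir_nr (fun x => x.2) true

-- ===== PRECONDITION & SPEC =====
def Spec_order_by_imaginary (sir_nr : List (Int × Int)) (out : List (Int × Int)) : Prop := out = order_by_imaginary_alt sir_nr
instance (sir_nr : List (Int × Int)) (out : List (Int × Int)) : Decidable (Spec_order_by_imaginary sir_nr out) := by unfold Spec_order_by_imaginary; infer_instance

-- ===== CLAIM (what is proved, stated in full; the proofs are below) =====
def Claim_equal_order_by_imaginary : Prop := ∀ (sir_nr : List (Int × Int)), Dom_order_by_imaginary sir_nr → Spec_order_by_imaginary sir_nr (order_by_imaginary sir_nr)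

-- ===== LEMMAS AND PROOFS =====

-- inserting two elements with strictly ordered keys into an accumulator commutes
theorem ins_comm (a b : Int × Int) (h : a.2 < b.2) (acc : List (Int × Int)) :
    PySem.List.insertBy (fun x y => decide (y.2 < x.2)) a
      (PySem.List.insertBy (fun x y => decide (y.2 < x.2)) b acc)
    = PySem.List.insertBy (fun x y => decide (y.2 < x.2)) b
      (PySem.List.insertBy (fun x y => decide (y.2 < x.2)) a acc) := by
  induction acc with
  | nil =>
      simp only [PySem.List.insertBy]
      have h1 : ¬ b.2 < a.2 := by omega
      simp [h, h1, PySem.List.insertBy]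
  | cons y t ih =>
      by_cases hyb : y.2 < b.2
      · by_cases hya : y.2 < a.2
        · have h1 : ¬ b.2 < a.2 := by omega
          simp [PySem.List.insertBy, hyb, hya, h, h1]
        · have h1 : ¬ b.2 < a.2 := by omega
          simp [PySem.List.insertBy, hyb, hya, h1]
      · have hya : ¬ y.2 < a.2 := by omega
        simp [PySem.List.insertBy, hyb, hya, ih]

-- a bubble pass does not change the insertion-sort fold of the list
theorem pvPass_foldl (xs : List (Int × Int)) : ∀ acc,
    List.foldl (fun acc x => PySem.List.insertBy (fun x y => decide (y.2 < x.2)) x acc) acc (pvPass xs).1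
    = List.foldl (fun acc x => PySem.List.insertBy (fun x y => decide (y.2 < x.2)) x acc) acc xs := by
  fun_induction pvPass with
  | case1 => intro acc; rfl
  | case2 a => intro acc; rfl
  | case3 a b t h ih =>
      intro acc
      simp only [List.foldl_cons]
      rw [ih]
      simp only [List.foldl_cons]
      rw [ins_comm a b h]
  | case4 a b t h ih =>
      intro acc
      simp only [List.foldl_cons]
      rw [ih]
      simp only [List.foldl_cons]

theorem pvPass_true_eq (xs : List (Int × Int)) (h : (pvPass xs).2 = true) : (pvPass xs).1 = xs := by
  fun_induction pvPass with
  | case1 => rfl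
  | case2 a => rfl
  | case3 a b t hab ih => simp [pvPass, hab] at h
  | case4 a b t hab ih =>
      simp only [pvPass, if_neg hab] at h ⊢
      rw [ih h]

theorem pvPass_true_pairwise (xs : List (Int × Int)) (h : (pvPass xs).2 = true) :
    List.Pairwise (fun a b : Int × Int => b.2 ≤ a.2) xs := by
  fun_induction pvPass with
  | case1 => exact List.Pairwise.nil
  | case2 a => simp
  | case3 a b t hab ih => simp [pvPass, hab] at h
  | case4 a b t hab ih =>
      simp only [pvPass, if_neg hab] at h
      have hp := ih h
      refine List.Pairwise.cons ?_ hp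
      intro y hy
      rcases List.mem_cons.mp hy with rfl | hyt
      · omega
      · have := List.rel_of_pairwise_cons hp hyt
        omega

theorem pvBubble_eq (xs : List (Int × Int)) :
    pvBubble xs = PySem.List.sorted xs (fun x : Int × Int => x.2) true := by
  rw [PySem.List.sorted_rev_eq_foldl_insertBy]
  fun_induction pvBubble with
  | case1 l h =>
      have heq := pvPass_true_eq l h
      rw [heq]
      have : PySem.List.sorted l (fun x : Int × Int => x.2) true = l :=
        PySem.List.sorted_rev_eq_self_of_pairwise l _ (pvPass_true_pairwise l h)
      rw [← PySem.List.sorted_rev_eq_foldl_insertBy, this]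
  | case2 l _ ih =>
      rw [ih, pvPass_foldl]

-- ===== VERDICT (by name: the statement is the Claim_ definition above) =====
theorem order_by_imaginary_spec : Claim_equal_order_by_imaginary := by
  intro sir_nr _
  unfold Spec_order_by_imaginary order_by_imaginary order_by_imaginary_alt
  exact pvBubble_eq sir_nr
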